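-- pv_equiv track=rewrite | github.com/palnatarajan123-ctrl/tamil-panchangam | tamil_panchangam_engine/app/services/birth_chart_builder.py | build_d1_from_planetary_positions
-- ===== SOURCE A (Python) =====
-- from typing import Dict, Any, List
--
-- ZODIAC_ORDER = [
--     "Mesham", "Rishabam", "Mithunam", "Kadakam",
--     "Simmam", "Kanni", "Thulam", "Vrischikam",
--     "Dhanusu", "Makaram", "Kumbham", "Meenam",
-- ]
--
-- def build_d1_from_planetary_positions(
--     planetary_positions: dict,
-- ) -> Dict[str, List[str]]:
--     chart = {r: [] for r in ZODIAC_ORDER}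
--     for planet, data in planetary_positions.items():
--         rasi = data.get("rasi")
--         if rasi in chart:
--             chart[rasi].append(planet)
--     return chart
-- ===== SOURCE B (Python) =====
-- ZODIAC_ORDER = [
--     "Mesham", "Rishabam", "Mithunam", "Kadakam",
--     "Simmam", "Kanni", "Thulam", "Vrischikam",
--     "Dhanusu", "Makaram", "Kumbham", "Meenam",
-- ]
--
-- def build_d1_from_planetary_positions(planetary_positions):
--     # per-sign nested scan: for each sign, filter the planets placed in it
--     return {
--         r: [p for p, d in planetary_positions.items() if d.get("rasi") == r]
--         for r in ZODIAC_ORDER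
--     }
-- ===== Notes on version B (the rewrite author's own statement) =====
-- stated objective: idiomatic
-- what changed: Replaces the single grouping pass that appends planets into pre-initialized per-sign buckets with a per-sign dict comprehension that scans the planetary positions once for each of the 12 signs.
import Mathlib
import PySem

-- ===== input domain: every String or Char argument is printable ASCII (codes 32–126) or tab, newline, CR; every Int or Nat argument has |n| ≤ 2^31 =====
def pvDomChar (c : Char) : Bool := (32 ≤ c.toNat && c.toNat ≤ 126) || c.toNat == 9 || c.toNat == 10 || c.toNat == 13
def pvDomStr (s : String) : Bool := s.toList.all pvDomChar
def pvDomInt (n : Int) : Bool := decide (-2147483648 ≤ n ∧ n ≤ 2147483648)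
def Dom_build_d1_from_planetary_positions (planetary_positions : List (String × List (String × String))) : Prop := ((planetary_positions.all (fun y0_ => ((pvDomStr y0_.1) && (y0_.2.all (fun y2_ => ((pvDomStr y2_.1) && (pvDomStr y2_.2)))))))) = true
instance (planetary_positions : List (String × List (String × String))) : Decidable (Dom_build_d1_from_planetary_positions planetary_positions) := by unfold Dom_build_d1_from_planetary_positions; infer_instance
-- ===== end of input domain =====

-- B groups by looping over the 12 signs and filtering the positions per sign, instead of
-- A's single pass appending into pre-initialized buckets; return values are proved equal.

-- ===== PORT A =====
def ZODIAC_ORDER : List String :=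
  ["Mesham", "Rishabam", "Mithunam", "Kadakam",
   "Simmam", "Kanni", "Thulam", "Vrischikam",
   "Dhanusu", "Makaram", "Kumbham", "Meenam"]

-- 'chart = {r: [] for r in ZODIAC_ORDER}' then 'for planet, data: rasi = data.get("rasi"); if rasi in chart: chart[rasi].append(planet)'
def build_d1_from_planetary_positions (planetary_positions : List (String × List (String × String))) : List (String × List String) :=
  let chart0 : PySem.Dict String (List String) :=
    ZODIAC_ORDER.foldl (fun c r => c.insert r ([] : List String)) PySem.Dict.empty
  let chart :=
    (PySem.Dict.ofList planetary_positions).items.foldl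
      (fun c pd =>
        match (PySem.Dict.ofList pd.2).get? "rasi" with
        | none => c
        | some r => if c.contains r then c.modify r [] (· ++ [pd.1]) else c)
      chart0
  chart.items

-- ===== PORT B =====
-- dict comprehension: {r: [p for p, d in items if d.get("rasi") == r] for r in ZODIAC_ORDER}
def build_d1_from_planetary_positions_alt (planetary_positions : List (String × List (String × String))) : List (String × List String) :=
  let ps := (PySem.Dict.ofList planetary_positions).items
  ZODIAC_ORDER.map (fun r =>
    (r, (ps.filter (fun pd => (PySem.Dict.ofList pd.2).get? "rasi" == some r)).map (·.1)))

-- ===== PRECONDITION & SPEC =====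
def Spec_build_d1_from_planetary_positions (planetary_positions : List (String × List (String × String))) (out : List (String × List String)) : Prop := out = build_d1_from_planetary_positions_alt planetary_positions
instance (planetary_positions : List (String × List (String × String))) (out : List (String × List String)) : Decidable (Spec_build_d1_from_planetary_positions planetary_positions out) := by unfold Spec_build_d1_from_planetary_positions; infer_instance

-- ===== CLAIM (what is proved, stated in full; the proofs are below) =====
def Claim_equal_build_d1_from_planetary_positions : Prop := ∀ (planetary_positions : List (String × List (String × String))), Dom_build_d1_from_planetary_positions planetary_positions → Spec_build_d1_from_planetary_positions planetary_positions (build_d1_from_planetary_positions planetary_positions)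

-- ===== LEMMAS AND PROOFS =====

def pvStep (c : PySem.Dict String (List String)) (pd : String × List (String × String)) :
    PySem.Dict String (List String) :=
  match (PySem.Dict.ofList pd.2).get? "rasi" with
  | none => c
  | some r => if c.contains r then c.modify r [] (· ++ [pd.1]) else c

def pvCollect (r : String) (L : List (String × List (String × String))) : List String :=
  (L.filter (fun pd => (PySem.Dict.ofList pd.2).get? "rasi" == some r)).map (·.1)

def pvChart0 : PySem.Dict String (List String) :=
  ZODIAC_ORDER.foldl (fun c r => c.insert r ([] : List String)) PySem.Dict.empty

theorem pvChart0_keys : pvChart0.keys = ZODIAC_ORDER := by decide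

theorem foldl_insert_nil_getD (zs : List String) (d : PySem.Dict String (List String))
    (r : String) (h : d.getD r [] = []) :
    (zs.foldl (fun c z => c.insert z ([] : List String)) d).getD r [] = [] := by
  induction zs generalizing d with
  | nil => exact h
  | cons z t ih =>
    rw [List.foldl_cons]
    refine ih _ ?_
    rw [PySem.Dict.getD_insert]
    split_ifs with hz
    · rfl
    · exact h

theorem pvChart0_getD (r : String) : pvChart0.getD r [] = [] :=
  foldl_insert_nil_getD ZODIAC_ORDER PySem.Dict.empty r (PySem.Dict.getD_empty ..)

theorem pvStep_keys (c : PySem.Dict String (List String)) (pd : String × List (String × String))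
    (hk : c.keys = ZODIAC_ORDER) : (pvStep c pd).keys = ZODIAC_ORDER := by
  unfold pvStep
  cases h : (PySem.Dict.ofList pd.2).get? "rasi" with
  | none => exact hk
  | some r =>
    by_cases hc : c.contains r = true
    · simp only [hc, if_true, PySem.Dict.keys_modify]
      rw [PySem.Dict.keys_insert_of_contains _ _ hc]
      exact hk
    · simp [hc]; exact hk

theorem pvStep_getD (c : PySem.Dict String (List String)) (pd : String × List (String × String))
    (hk : c.keys = ZODIAC_ORDER) (r : String) (hr : r ∈ ZODIAC_ORDER) :
    (pvStep c pd).getD r [] =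
      c.getD r [] ++
        (if ((PySem.Dict.ofList pd.2).get? "rasi" == some r) then [pd.1] else []) := by
  unfold pvStep
  cases h : (PySem.Dict.ofList pd.2).get? "rasi" with
  | none => simp
  | some s =>
    by_cases hc : c.contains s = true
    · simp only [hc, if_true, PySem.Dict.getD_modify]
      by_cases hrs : r = s
      · subst hrs; simp
      · have : ¬ (some s == some r) = true := by
          simp [beq_iff_eq]; exact fun e => hrs e.symm
        simp [hrs, this]
    · have hs : s ∉ ZODIAC_ORDER := by
        intro hmem
        exact hc ((PySem.Dict.contains_iff_mem_keys c s).mpr (hk ▸ hmem))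
      have hrs : ¬ (some s == some r) = true := by
        simp [beq_iff_eq]; intro e; exact hs (e ▸ hr)
      simp [hc, hrs]

theorem pvLoop_items (L : List (String × List (String × String)))
    (c : PySem.Dict String (List String)) (hk : c.keys = ZODIAC_ORDER) :
    (L.foldl pvStep c).items = ZODIAC_ORDER.map (fun r => (r, c.getD r [] ++ pvCollect r L)) := by
  induction L generalizing c with
  | nil =>
    have hnd : c.keys.Nodup := by rw [hk]; decide
    have := PySem.Dict.items_eq_map_keys c hnd ([] : List String)
    rw [List.foldl_nil, this, hk]
    simp [pvCollect]
  | cons pd t ih =>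
    rw [List.foldl_cons, ih (pvStep c pd) (pvStep_keys c pd hk)]
    apply List.map_congr_left
    intro r hr
    rw [pvStep_getD c pd hk r hr]
    have : pvCollect r (pd :: t) =
        (if ((PySem.Dict.ofList pd.2).get? "rasi" == some r) then [pd.1] else []) ++ pvCollect r t := by
      unfold pvCollect
      by_cases h : ((PySem.Dict.ofList pd.2).get? "rasi" == some r) = true <;>
        simp [h]
    rw [this, List.append_assoc]

-- ===== VERDICT (by name: the statement is the Claim_ definition above) =====
theorem build_d1_from_planetary_positions_spec : Claim_equal_build_d1_from_planetary_positions := by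
  intro pp _
  show build_d1_from_planetary_positions pp = build_d1_from_planetary_positions_alt pp
  have h2 : build_d1_from_planetary_positions pp =
      ZODIAC_ORDER.map (fun r => (r, pvChart0.getD r [] ++ pvCollect r (PySem.Dict.ofList pp).items)) :=
    pvLoop_items (PySem.Dict.ofList pp).items pvChart0 pvChart0_keys
  rw [h2]
  show _ = ZODIAC_ORDER.map (fun r => (r, pvCollect r (PySem.Dict.ofList pp).items))
  apply List.map_congr_left
  intro r hr
  rw [pvChart0_getD r, List.nil_append]
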